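-- pv_equiv track=rewrite | github.com/ngkhnghia/Exam_Python_KTeam | Bai62.py | ky_Tu_Nguyen_Am
-- ===== SOURCE A (Python) =====
-- def ky_Tu_Nguyen_Am(s):
--     list_Nguyen_Am = ['u', 'e', 'o', 'a', 'i', 'U', 'E', 'O', 'A', 'I']
--     count = 0
--     for i in list_Nguyen_Am:
--         if i in s:
--             count += s.count(i)
--             s = s.replace(i, '$')
--     return count, s
-- ===== SOURCE B (Python) =====
-- def ky_Tu_Nguyen_Am(s):
--     vowels = set('ueoaiUEOAI')
--     count = 0
--     out = []
--     for ch in s: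
--         if ch in vowels:
--             count += 1
--             out.append('$')
--         else:
--             out.append(ch)
--     return count, ''.join(out)
-- ===== Notes on version B (the rewrite author's own statement) =====
-- stated objective: alternative
-- what changed: Replaces A's ten whole-string passes (membership test, count and replace per vowel) with a single left-to-right character scan against a vowel set that counts and builds the output buffer in one pass; in CPython A's C-level str methods are faster, so no speed is claimed.
import Mathlib
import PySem

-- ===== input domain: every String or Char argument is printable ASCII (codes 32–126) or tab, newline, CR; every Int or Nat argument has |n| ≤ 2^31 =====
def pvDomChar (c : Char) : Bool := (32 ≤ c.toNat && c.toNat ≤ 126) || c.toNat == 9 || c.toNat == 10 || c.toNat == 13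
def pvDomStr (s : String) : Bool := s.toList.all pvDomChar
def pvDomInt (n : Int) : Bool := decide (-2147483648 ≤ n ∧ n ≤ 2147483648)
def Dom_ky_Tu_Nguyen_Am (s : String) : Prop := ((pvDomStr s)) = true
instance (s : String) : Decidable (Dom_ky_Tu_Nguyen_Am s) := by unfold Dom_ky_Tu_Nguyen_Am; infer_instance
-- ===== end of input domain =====

-- B replaces A's ten whole-string passes (membership/count/replace per vowel) with one
-- character-level scan that counts vowels and builds the output in a single pass (objective: alternative).

-- ===== PORT A =====
def ky_Tu_Nguyen_Am (s : String) : Int × String :=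
  let list_Nguyen_Am : List String := ["u", "e", "o", "a", "i", "U", "E", "O", "A", "I"]
  list_Nguyen_Am.foldl
    (fun (st : Int × String) i =>
      if PySem.Str.isIn i st.2 then
        (st.1 + (PySem.Str.count st.2 i : Int), PySem.Str.replace st.2 i "$")
      else st)
    (0, s)

-- ===== PORT B =====
-- ''.join(out) over the one-character pieces accumulated in out is String.ofList of the char list.
def ky_Tu_Nguyen_Am_alt (s : String) : Int × String :=
  let vowels : PySem.Set Char := PySem.Set.ofList "ueoaiUEOAI".toList
  let r := s.toList.foldl
    (fun (st : Int × List Char) ch =>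
      if PySem.Set.contains vowels ch then (st.1 + 1, st.2 ++ ['$'])
      else (st.1, st.2 ++ [ch]))
    ((0 : Int), [])
  (r.1, String.ofList r.2)

-- ===== PRECONDITION & SPEC =====
def Spec_ky_Tu_Nguyen_Am (s : String) (out : Int × String) : Prop := out = ky_Tu_Nguyen_Am_alt s
instance (s : String) (out : Int × String) : Decidable (Spec_ky_Tu_Nguyen_Am s out) := by unfold Spec_ky_Tu_Nguyen_Am; infer_instance

-- ===== CLAIM (what is proved, stated in full; the proofs are below) =====
def Claim_equal_ky_Tu_Nguyen_Am : Prop := ∀ (s : String), Dom_ky_Tu_Nguyen_Am s → Spec_ky_Tu_Nguyen_Am s (ky_Tu_Nguyen_Am s)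

-- ===== LEMMAS AND PROOFS =====

-- Python s.count(v) for a single-character needle is List.count.
theorem count_go_single (v : Char) (l : List Char) (fuel acc : Nat) (h : l.length ≤ fuel) :
    PySem.Chars.count.go [v] fuel l acc = acc + l.count v := by
  induction l generalizing fuel acc with
  | nil => cases fuel <;> simp [PySem.Chars.count.go]
  | cons c t ih =>
    cases fuel with
    | zero => simp at h
    | succ f =>
      have ht : t.length ≤ f := by simpa using h
      by_cases hc : v = c
      · subst hc
        simp only [PySem.Chars.count.go, List.isPrefixOf, beq_self_eq_true, Bool.true_and,
          if_true, List.length_singleton, List.drop_succ_cons,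
          List.drop_zero, ih f (acc + 1) ht, List.count_cons_self]
        omega
      · have hb : (v == c) = false := by simp [hc]
        simp [PySem.Chars.count.go, List.isPrefixOf, hb, ih f acc ht, Ne.symm hc]

-- Python s.replace(v, '$') for a single-character needle is a per-character map.
theorem replace_go_single (v : Char) (l : List Char) (fuel : Nat) (acc : List Char) (h : l.length ≤ fuel) :
    PySem.Chars.replace.go [v] ['$'] fuel l acc
      = acc.reverse ++ l.map (fun c => if c = v then '$' else c) := by
  induction l generalizing fuel acc with
  | nil => cases fuel <;> simp [PySem.Chars.replace.go]
  | cons c t ih =>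
    cases fuel with
    | zero => simp at h
    | succ f =>
      have ht : t.length ≤ f := by simpa using h
      by_cases hc : v = c
      · subst hc
        simp only [PySem.Chars.replace.go, List.isPrefixOf, beq_self_eq_true, Bool.true_and,
          if_true, List.length_singleton, List.drop_succ_cons,
          List.drop_zero, ih f _ ht, List.map_cons]
        simp
      · have hb : (v == c) = false := by simp [hc]
        simp [PySem.Chars.replace.go, List.isPrefixOf, hb, ih f _ ht, Ne.symm hc]

theorem chars_count_single (v : Char) (l : List Char) :
    PySem.Chars.count l [v] = l.count v := by
  simpa using count_go_single v l l.length 0 le_rfl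

theorem chars_replace_single (v : Char) (l : List Char) :
    PySem.Chars.replace l [v] ['$'] = l.map (fun c => if c = v then '$' else c) := by
  simpa using replace_go_single v l l.length [] le_rfl

-- One iteration of A's loop: the branch on `v in s` is irrelevant (when the vowel is
-- absent, count is 0 and replace is the identity), so each iteration counts v and maps it away.
theorem stepA_single (v : Char) (n : Int) (l : List Char) :
    (if PySem.Str.isIn (String.ofList [v]) (String.ofList l) then
        (n + (PySem.Str.count (String.ofList l) (String.ofList [v]) : Int),
         PySem.Str.replace (String.ofList l) (String.ofList [v]) "$")
      else (n, String.ofList l))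
    = (n + (l.count v : Int), String.ofList (l.map (fun c => if c = v then '$' else c))) := by
  by_cases h : PySem.Str.isIn (String.ofList [v]) (String.ofList l) = true
  · rw [if_pos h]
    refine Prod.ext ?_ ?_
    · simp [PySem.Str.count_eq, chars_count_single]
    · apply String.toList_inj.mp
      simp [PySem.Str.toList_replace, chars_replace_single]
  · rw [if_neg h]
    have hmem : v ∉ l := by
      rw [PySem.Str.isIn_iff_infix] at h
      simp only [String.toList_ofList] at h
      rw [List.singleton_infix_iff] at h
      exact h
    have h1 : l.count v = 0 := List.count_eq_zero.mpr hmem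
    have h2 : l.map (fun c => if c = v then '$' else c) = l := by
      apply List.map_congr_left (fun c hc => ?_) |>.trans l.map_id
      simp [show c ≠ v from fun e => hmem (e ▸ hc)]
    rw [h1, h2]
    simp

theorem countP_split (v : Char) (vs : List Char) (hv : v ∉ vs) (l : List Char) :
    l.countP (fun c => decide (c ∈ v :: vs)) = l.count v + l.countP (fun c => decide (c ∈ vs)) := by
  induction l with
  | nil => simp
  | cons c t iht =>
    rw [List.countP_cons, List.countP_cons, List.count_cons, iht]
    by_cases hc : c = v
    · subst hc; simp [hv]; omega
    · by_cases hc2 : c ∈ vs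
      · simp [hc, hc2]; omega
      · simp [hc, hc2]

theorem countP_map_repl (v : Char) (vs : List Char) (hv : v ∉ vs) (hd : '$' ∉ vs) (l : List Char) :
    (l.map (fun c => if c = v then '$' else c)).countP (fun c => decide (c ∈ vs))
      = l.countP (fun c => decide (c ∈ vs)) := by
  rw [List.countP_map]
  refine List.countP_congr (fun c _ => ?_)
  by_cases hc : c = v
  · subst hc; simp [Function.comp, hv, hd]
  · simp [Function.comp, hc]

theorem map_repl_comm (v : Char) (vs : List Char) (hd : '$' ∉ vs) (l : List Char) :
    (l.map (fun c => if c = v then '$' else c)).map (fun c => if c ∈ vs then '$' else c)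
      = l.map (fun c => if c ∈ v :: vs then '$' else c) := by
  rw [List.map_map]
  refine List.map_congr_left (fun c _ => ?_)
  by_cases hc : c = v
  · subst hc; simp [hd, Function.comp]
  · simp [Function.comp, hc, List.mem_cons]

-- A's whole loop over any duplicate-free, '$'-free list of single-character vowels.
theorem foldA (vs : List Char) (hnd : vs.Nodup) (hd : '$' ∉ vs) (n : Int) (l : List Char) :
    (vs.map (fun c => String.ofList [c])).foldl
      (fun (st : Int × String) i =>
        if PySem.Str.isIn i st.2 then
          (st.1 + (PySem.Str.count st.2 i : Int), PySem.Str.replace st.2 i "$")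
        else st)
      (n, String.ofList l)
    = (n + (l.countP (fun c => decide (c ∈ vs)) : Int),
       String.ofList (l.map (fun c => if c ∈ vs then '$' else c))) := by
  induction vs generalizing n l with
  | nil => simp
  | cons v vs ih =>
    obtain ⟨hv, hnd'⟩ := List.nodup_cons.mp hnd
    have hd' : '$' ∉ vs := fun h => hd (List.mem_cons_of_mem _ h)
    simp only [List.map_cons, List.foldl_cons]
    rw [stepA_single, ih hnd' hd' _ _]
    rw [countP_map_repl v vs hv hd', map_repl_comm v vs hd', countP_split v vs hv]
    refine Prod.ext ?_ rfl
    push_cast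
    ring

-- B's single scan: count and output buffer in one pass.
theorem foldB (p : Char → Bool) (l : List Char) (n : Int) (acc : List Char) :
    l.foldl
      (fun (st : Int × List Char) ch =>
        if p ch then (st.1 + 1, st.2 ++ ['$']) else (st.1, st.2 ++ [ch]))
      (n, acc)
    = (n + (l.countP p : Int), acc ++ l.map (fun ch => if p ch then '$' else ch)) := by
  induction l generalizing n acc with
  | nil => simp
  | cons c t ih =>
    simp only [List.foldl_cons]
    by_cases hc : p c
    · rw [if_pos hc, ih]
      simp [hc]
      ring
    · rw [if_neg hc, ih]
      simp [hc]

-- ===== VERDICT (by name: the statement is the Claim_ definition above) =====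
theorem ky_Tu_Nguyen_Am_spec : Claim_equal_ky_Tu_Nguyen_Am := by
  intro s _
  unfold Spec_ky_Tu_Nguyen_Am ky_Tu_Nguyen_Am ky_Tu_Nguyen_Am_alt
  dsimp only
  have hV : (["u", "e", "o", "a", "i", "U", "E", "O", "A", "I"] : List String)
      = (['u', 'e', 'o', 'a', 'i', 'U', 'E', 'O', 'A', 'I'] : List Char).map
          (fun c => String.ofList [c]) := by decide
  have hA := foldA ['u', 'e', 'o', 'a', 'i', 'U', 'E', 'O', 'A', 'I'] (by decide) (by decide)
    0 s.toList
  rw [String.ofList_toList] at hA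
  rw [hV, hA]
  have hset : (PySem.Set.ofList "ueoaiUEOAI".toList : List Char)
      = ['u', 'e', 'o', 'a', 'i', 'U', 'E', 'O', 'A', 'I'] := by decide
  rw [foldB]
  have hp : ∀ ch, PySem.Set.contains (PySem.Set.ofList "ueoaiUEOAI".toList) ch
      = decide (ch ∈ (['u', 'e', 'o', 'a', 'i', 'U', 'E', 'O', 'A', 'I'] : List Char)) := by
    intro ch
    rw [PySem.Set.contains_eq_listContains, hset]
    by_cases h : ch ∈ (['u', 'e', 'o', 'a', 'i', 'U', 'E', 'O', 'A', 'I'] : List Char)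
    · simp [h]
    · simp [h]
  have hcount : s.toList.countP (fun ch => PySem.Set.contains (PySem.Set.ofList "ueoaiUEOAI".toList) ch)
      = s.toList.countP (fun c => decide (c ∈ (['u', 'e', 'o', 'a', 'i', 'U', 'E', 'O', 'A', 'I'] : List Char))) :=
    List.countP_congr (fun c _ => by rw [hp c])
  have hmap : s.toList.map (fun ch => if PySem.Set.contains (PySem.Set.ofList "ueoaiUEOAI".toList) ch then '$' else ch)
      = s.toList.map (fun c => if c ∈ (['u', 'e', 'o', 'a', 'i', 'U', 'E', 'O', 'A', 'I'] : List Char) then '$' else c) :=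
    List.map_congr_left (fun c _ => by rw [hp c]; simp)
  rw [hcount, hmap, List.nil_append]
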